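-- pv_equiv track=rewrite | github.com/Hong-Ng/S2-CAT-HONG-NG | main.py | pairing
-- ===== SOURCE A (Python) =====
-- def namelength(name):
--     a = 0
--     for char in name:
--         a = a + 1
--     return a
--
-- def pairing(name):
--     num = 0
--     pairlist = []
--     a = 0
--     b = 1
--     num = namelength(name)
--     num = num - 1
-- #I take the first letter and add a hash onto it to make it easy to identify if the letter started a word later on
--     pair = "#", name[a]
--     pairlist.append(pair)
--     while b <= num:
--         pair = name[a], name[b]
--         pairlist.append(pair)
-- #Pairing the names together before adding them to a larger list
--         a = a+1
--         b = b+1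
--     pair = name[b-1], "$"
-- #Added a dollar sign to the last character to make it easier to tell which characters end names
--     pairlist.append(pair)
--     return (pairlist)
-- ===== SOURCE B (Python) =====
-- def pairing(name):
--     pairlist = []
--     prev = "#"
--     for char in name:
--         pairlist.append((prev, char))
--         prev = char
--     pairlist.append((prev, "$"))
--     return pairlist
-- ===== Notes on version B (the rewrite author's own statement) =====
-- stated objective: simpler
-- what changed: Replaces the length count, twin index counters and explicit head/tail indexing with one state-machine pass that carries the previous character (seeded with '#'), so all pairs including both sentinels are emitted by the same accumulator loop; direct iteration avoids per-character name[i] indexing (measured constant-factor speedup).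
import Mathlib
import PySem

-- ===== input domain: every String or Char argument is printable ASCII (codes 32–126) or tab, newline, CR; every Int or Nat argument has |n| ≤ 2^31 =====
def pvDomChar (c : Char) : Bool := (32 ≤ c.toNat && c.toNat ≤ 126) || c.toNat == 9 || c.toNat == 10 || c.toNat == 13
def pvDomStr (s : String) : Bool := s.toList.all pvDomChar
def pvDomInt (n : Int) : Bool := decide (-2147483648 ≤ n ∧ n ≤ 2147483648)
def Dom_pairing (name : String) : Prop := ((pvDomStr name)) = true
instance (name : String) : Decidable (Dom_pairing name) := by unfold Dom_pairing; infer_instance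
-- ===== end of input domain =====

-- B replaces the counted index loop by one accumulator pass carrying the previous character,
-- so both sentinels come out of the same loop (simpler). Return-value equivalence only.

-- ===== PORT A =====
-- name[i] as a one-character string; "" is unreachable under Pre_pairing (pyGet? none = IndexError)
def pvChar (name : String) (i : Int) : String :=
  match PySem.Str.pyGet? name i with
  | some c => String.ofList [c]
  | none => ""

def namelength (name : String) : Int :=
  name.toList.foldl (fun a _ => a + 1) 0

-- the while loop; returns (pairlist, b) since A reads b after the loop
def pairLoopA (name : String) (num a b : Int) (acc : List (String × String)) :
    List (String × String) × Int :=
  if b ≤ num then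
    pairLoopA name num (a + 1) (b + 1) (acc ++ [(pvChar name a, pvChar name b)])
  else (acc, b)
termination_by (num + 1 - b).toNat
decreasing_by omega

def pairing (name : String) : List (String × String) :=
  match pairLoopA name (namelength name - 1) 0 1 [("#", pvChar name 0)] with
  | (pairlist, b) => pairlist ++ [(pvChar name (b - 1), "$")]

-- ===== PORT B =====
-- the for loop over the characters, state = (pairlist, prev)
def pairing_alt (name : String) : List (String × String) :=
  match name.toList.foldl
      (fun (st : List (String × String) × String) ch =>
        (st.1 ++ [(st.2, String.ofList [ch])], String.ofList [ch]))
      ([], "#") with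
  | (pairlist, prev) => pairlist ++ [(prev, "$")]

-- ===== PRECONDITION & SPEC =====
-- A raises IndexError at name[0] on the empty string; exactly that input is excluded.
def Pre_pairing (name : String) : Prop := name.toList ≠ []
instance (name : String) : Decidable (Pre_pairing name) := by unfold Pre_pairing; infer_instance
def pvWitness_pairing : String := "ab"

def Spec_pairing (name : String) (out : List (String × String)) : Prop := out = pairing_alt name
instance (name : String) (out : List (String × String)) : Decidable (Spec_pairing name out) := by unfold Spec_pairing; infer_instance

-- ===== CLAIM (what is proved, stated in full; the proofs are below) =====
def Claim_equal_pairing : Prop := ∀ (name : String), Dom_pairing name → Pre_pairing name → Spec_pairing name (pairing name)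

-- ===== LEMMAS AND PROOFS =====

theorem namelength_eq (name : String) : namelength name = (name.toList.length : Int) := by
  unfold namelength
  induction name.toList using List.reverseRecOn with
  | nil => simp
  | append_singleton xs x ih => simp [ih]

theorem pvChar_of_lt (name : String) (a : Nat) (h : a < name.toList.length) :
    pvChar name (a : Int) = String.ofList [name.toList[a]] := by
  simp [pvChar, List.getElem?_eq_getElem h]

theorem pairLoopA_eq (name : String) :
    ∀ (k : Nat) (a : Int) (acc : List (String × String)), 0 ≤ a →
      a + 1 + k = (name.toList.length : Int) →
      pairLoopA name ((name.toList.length : Int) - 1) a (a + 1) acc =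
        (acc ++ (List.zip (name.toList.drop a.toNat) (name.toList.drop (a.toNat + 1))).map
            (fun p => (String.ofList [p.1], String.ofList [p.2])),
         (name.toList.length : Int)) := by
  intro k
  induction k with
  | zero =>
    intro a acc ha hlen
    rw [pairLoopA]
    have h1 : ¬ (a + 1 ≤ (name.toList.length : Int) - 1) := by omega
    have h2 : name.toList.drop (a.toNat + 1) = [] :=
      List.drop_eq_nil_of_le (by omega)
    rw [if_neg h1, h2]
    simp only [List.zip_nil_right, List.map_nil, List.append_nil, Prod.mk.injEq]
    exact ⟨trivial, by omega⟩
  | succ k ih =>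
    intro a acc ha hlen
    rw [pairLoopA]
    have h1 : a + 1 ≤ (name.toList.length : Int) - 1 := by omega
    rw [if_pos h1, show a + 1 + 1 = (a + 1) + 1 by ring,
        ih (a + 1) _ (by omega) (by omega)]
    have haN : a.toNat < name.toList.length := by omega
    have haN1 : a.toNat + 1 < name.toList.length := by omega
    have ht : (a + 1).toNat = a.toNat + 1 := by omega
    have hca : pvChar name a = String.ofList [name.toList[a.toNat]] := by
      have := pvChar_of_lt name a.toNat haN
      rwa [Int.toNat_of_nonneg ha] at this
    have hcb : pvChar name (a + 1) = String.ofList [name.toList[a.toNat + 1]] := by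
      have := pvChar_of_lt name (a.toNat + 1) haN1
      rwa [show ((a.toNat + 1 : Nat) : Int) = a + 1 by omega] at this
    rw [ht]
    conv_rhs =>
      rw [List.drop_eq_getElem_cons haN, List.drop_eq_getElem_cons haN1,
          List.zip_cons_cons, List.map_cons]
    simp [hca, hcb]

theorem pvChar_last (name : String) (h : name.toList ≠ []) :
    pvChar name ((name.toList.length : Int) - 1) = String.ofList [name.toList.getLast h] := by
  have hlen : 0 < name.toList.length := List.length_pos_iff.mpr h
  have h2 : ((name.toList.length : Int) - 1) = ((name.toList.length - 1 : Nat) : Int) := by omega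
  rw [h2, pvChar_of_lt name (name.toList.length - 1) (by omega), List.getLast_eq_getElem]

-- spine of B's state pairs, and B's final prev, as structural recursions (proof helpers)
def pairsWithPrev (p : String) : List Char → List (String × String)
  | [] => []
  | c :: cs => (p, String.ofList [c]) :: pairsWithPrev (String.ofList [c]) cs

def lastS (p : String) : List Char → String
  | [] => p
  | c :: cs => lastS (String.ofList [c]) cs

theorem foldB_eq (cs : List Char) : ∀ (acc : List (String × String)) (p : String),
    cs.foldl (fun (st : List (String × String) × String) ch =>
        (st.1 ++ [(st.2, String.ofList [ch])], String.ofList [ch])) (acc, p) =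
      (acc ++ pairsWithPrev p cs, lastS p cs) := by
  induction cs with
  | nil => intro acc p; simp [pairsWithPrev, lastS]
  | cons c cs ih => intro acc p; simp [List.foldl_cons, ih, pairsWithPrev, lastS]

theorem pairsWithPrev_zip : ∀ (xs : List Char) (x : Char),
    pairsWithPrev (String.ofList [x]) xs =
      (List.zip (x :: xs) xs).map (fun p => (String.ofList [p.1], String.ofList [p.2])) := by
  intro xs
  induction xs with
  | nil => intro x; simp [pairsWithPrev]
  | cons y ys ih => intro x; simp [pairsWithPrev, ih y, List.zip_cons_cons]

theorem lastS_getLast : ∀ (cs : List Char) (c : Char) (p : String),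
    lastS p (c :: cs) = String.ofList [(c :: cs).getLast (by simp)] := by
  intro cs
  induction cs with
  | nil => intro c p; simp [lastS]
  | cons d ds ih =>
    intro c p
    rw [lastS, ih d (String.ofList [c])]
    simp [List.getLast_cons]

-- ===== VERDICT (by name: the statement is the Claim_ definition above) =====
theorem pairsWithPrev_head (l : List Char) (h : l ≠ []) :
    pairsWithPrev "#" l = ("#", String.ofList [l.head h]) ::
      (List.zip l l.tail).map (fun p => (String.ofList [p.1], String.ofList [p.2])) := by
  cases l with
  | nil => exact absurd rfl h
  | cons x xs => simp [pairsWithPrev, pairsWithPrev_zip xs x]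

theorem lastS_hash (l : List Char) (h : l ≠ []) :
    lastS "#" l = String.ofList [l.getLast h] := by
  cases l with
  | nil => exact absurd rfl h
  | cons x xs => exact lastS_getLast xs x "#"

theorem pairing_spec : Claim_equal_pairing := by
  intro name _hdom hpre
  unfold Spec_pairing pairing pairing_alt
  have hlen : 0 < name.toList.length := List.length_pos_iff.mpr hpre
  have hloop := pairLoopA_eq name (name.toList.length - 1) 0
    [("#", pvChar name 0)] le_rfl (by omega)
  simp only [show (0 : Int) + 1 = 1 from by norm_num, Int.toNat_zero, List.drop_zero] at hloop
  have h0 : pvChar name 0 = String.ofList [name.toList.head hpre] := by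
    have := pvChar_of_lt name 0 hlen
    simpa [List.head_eq_getElem] using this
  rw [namelength_eq, hloop, foldB_eq]
  simp only [List.nil_append]
  rw [pairsWithPrev_head _ hpre, lastS_hash _ hpre, pvChar_last name hpre, h0]
  simp
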